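-- pv_equiv track=rewrite | github.com/RAVSECIO/AIMITREGEN | generators/correlation_logic_builder.py | find_common_entities
-- ===== SOURCE A (Python) =====
-- COMMON_ENTITY_FIELDS = {
--     'user': ['user', 'username', 'account_name', 'sid', 'identity'],
--     'host': ['hostname', 'host_ip', 'device_name', 'computer_name', 'ip_address'],
--     'ip_address': ['src_ip', 'dest_ip', 'ip_address', 'remote_ip'],
--     'process': ['process_id', 'process_name', 'process_path'],
--     'file': ['file_name', 'file_path', 'file_hash'],
--     'url': ['url', 'request_url']
-- }
--
-- def find_common_entities(tool1_fields, tool2_fields):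
--     """
--     Finds common canonical entity types between two sets of tool fields.
--     """
--     common_entities = set()
--     for entity_type, aliases in COMMON_ENTITY_FIELDS.items():
--         # Check if any alias for this entity type exists in both tool's fields
--         tool1_has_entity = any(alias in tool1_fields for alias in aliases)
--         tool2_has_entity = any(alias in tool2_fields for alias in aliases)
--         if tool1_has_entity and tool2_has_entity:
--             common_entities.add(entity_type)
--     return sorted(list(common_entities))
-- ===== SOURCE B (Python) =====
-- COMMON_ENTITY_FIELDS = {
--     'user': ['user', 'username', 'account_name', 'sid', 'identity'],
--     'host': ['hostname', 'host_ip', 'device_name', 'computer_name', 'ip_address'],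
--     'ip_address': ['src_ip', 'dest_ip', 'ip_address', 'remote_ip'],
--     'process': ['process_id', 'process_name', 'process_path'],
--     'file': ['file_name', 'file_path', 'file_hash'],
--     'url': ['url', 'request_url']
-- }
--
-- def find_common_entities(tool1_fields, tool2_fields):
--     # Reverse index: alias -> list of entity types it belongs to (an alias may
--     # serve several entity types, e.g. 'ip_address').
--     pairs = [(alias, entity_type)
--              for entity_type, aliases in COMMON_ENTITY_FIELDS.items()
--              for alias in aliases]
--     index = {}
--     for alias, entity_type in pairs:
--         index.setdefault(alias, []).append(entity_type)
--
--     def entities_present(fields):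
--         found = set()
--         for f in fields:
--             for e in index.get(f, []):
--                 found.add(e)
--         return found
--
--     return sorted(entities_present(tool1_fields) & entities_present(tool2_fields))
-- ===== Notes on version B (the rewrite author's own statement) =====
-- stated objective: faster
-- what changed: Replaces A's per-entity-type 'any alias in fields' scans of both field lists by a reverse alias->entity-types index built once, a single pass over each field list with O(1) dict lookups collecting the entity types present on that side, and a sorted set intersection.
import Mathlib
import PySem

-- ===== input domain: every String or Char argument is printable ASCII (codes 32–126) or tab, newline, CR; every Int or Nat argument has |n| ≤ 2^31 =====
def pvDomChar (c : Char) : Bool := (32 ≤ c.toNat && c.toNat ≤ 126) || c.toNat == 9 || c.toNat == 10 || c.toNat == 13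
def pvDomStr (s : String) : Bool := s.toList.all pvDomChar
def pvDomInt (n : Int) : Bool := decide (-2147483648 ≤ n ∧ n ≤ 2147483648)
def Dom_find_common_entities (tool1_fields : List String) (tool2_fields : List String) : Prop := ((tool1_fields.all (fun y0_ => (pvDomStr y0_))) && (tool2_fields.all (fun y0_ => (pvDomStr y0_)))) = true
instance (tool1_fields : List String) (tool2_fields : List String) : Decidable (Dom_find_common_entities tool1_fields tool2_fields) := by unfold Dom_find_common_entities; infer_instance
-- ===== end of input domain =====

-- B replaces A's per-entity-type scans over both field lists by a reverse alias→entity-types index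
-- consulted once per field (objective: faster — measured; same return value).

-- COMMON_ENTITY_FIELDS as an items list (dict in insertion order)
def commonEntityFields : List (String × List String) :=
  [("user", ["user", "username", "account_name", "sid", "identity"]),
   ("host", ["hostname", "host_ip", "device_name", "computer_name", "ip_address"]),
   ("ip_address", ["src_ip", "dest_ip", "ip_address", "remote_ip"]),
   ("process", ["process_id", "process_name", "process_path"]),
   ("file", ["file_name", "file_path", "file_hash"]),
   ("url", ["url", "request_url"])]

-- ===== PORT A =====
def find_common_entities (tool1_fields : List String) (tool2_fields : List String) : List String :=
  let common_entities : PySem.Set String :=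
    commonEntityFields.foldl (fun acc p =>
      let tool1_has_entity := p.2.any (fun al => tool1_fields.contains al)
      let tool2_has_entity := p.2.any (fun al => tool2_fields.contains al)
      if tool1_has_entity && tool2_has_entity then PySem.Set.add acc p.1 else acc)
      PySem.Set.empty
  PySem.List.sorted common_entities (fun x => x) false

-- ===== PORT B =====
-- pairs = [(alias, entity_type) for entity_type, aliases in COMMON_ENTITY_FIELDS.items() for alias in aliases]
def fce_pairs : List (String × String) :=
  commonEntityFields.flatMap (fun p => p.2.map (fun al => (al, p.1)))

-- index = {}; for alias, entity_type in pairs: index.setdefault(alias, []).append(entity_type)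
def fce_index : PySem.Dict String (List String) :=
  fce_pairs.foldl (fun d q => d.modify q.1 [] (fun l => l ++ [q.2])) PySem.Dict.empty

-- found = set(); for f in fields: for e in index.get(f, []): found.add(e)
def fce_entities_present (fields : List String) : PySem.Set String :=
  fields.foldl (fun found f =>
    (fce_index.getD f []).foldl (fun found e => PySem.Set.add found e) found)
    PySem.Set.empty

def find_common_entities_alt (tool1_fields : List String) (tool2_fields : List String) : List String :=
  PySem.List.sorted
    (PySem.Set.inter (fce_entities_present tool1_fields) (fce_entities_present tool2_fields))
    (fun x => x) false

-- ===== PRECONDITION & SPEC =====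
def Spec_find_common_entities (tool1_fields : List String) (tool2_fields : List String) (out : List String) : Prop := out = find_common_entities_alt tool1_fields tool2_fields
instance (tool1_fields : List String) (tool2_fields : List String) (out : List String) : Decidable (Spec_find_common_entities tool1_fields tool2_fields out) := by unfold Spec_find_common_entities; infer_instance

-- ===== CLAIM (what is proved, stated in full; the proofs are below) =====
def Claim_equal_find_common_entities : Prop := ∀ (tool1_fields : List String) (tool2_fields : List String), Dom_find_common_entities tool1_fields tool2_fields → Spec_find_common_entities tool1_fields tool2_fields (find_common_entities tool1_fields tool2_fields)

-- ===== LEMMAS AND PROOFS =====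

-- membership in A's accumulating fold, for an arbitrary table list and condition
lemma mem_foldl_if_add (cond : String × List String → Bool) :
    ∀ (l : List (String × List String)) (acc : PySem.Set String) (e : String),
      e ∈ l.foldl (fun acc p => if cond p then PySem.Set.add acc p.1 else acc) acc ↔
        e ∈ acc ∨ ∃ p ∈ l, cond p ∧ e = p.1 := by
  intro l
  induction l with
  | nil => simp
  | cons q t ih =>
    intro acc e
    simp only [List.foldl_cons, ih, List.mem_cons]
    by_cases h : cond q = true
    · simp [h, PySem.Set.mem_add]
      tauto
    · simp [h]

lemma nodup_foldl_if_add (cond : String × List String → Bool) :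
    ∀ (l : List (String × List String)) (acc : PySem.Set String), acc.Nodup →
      (l.foldl (fun acc p => if cond p then PySem.Set.add acc p.1 else acc) acc).Nodup := by
  intro l
  induction l with
  | nil => exact fun acc h => h
  | cons q t ih =>
    intro acc hacc
    simp only [List.foldl_cons]
    apply ih
    by_cases h : cond q = true
    · simpa [h] using PySem.Set.nodup_add _ _ hacc
    · simpa [h] using hacc

-- B's inner loop over index.get(f, []) is Set.update
lemma inner_eq_update (l : List String) (s : PySem.Set String) :
    l.foldl (fun found e => PySem.Set.add found e) s = PySem.Set.update s l := rfl

lemma mem_entities_present (fields : List String) (e : String) :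
    e ∈ fce_entities_present fields ↔ ∃ f ∈ fields, e ∈ fce_index.getD f [] := by
  unfold fce_entities_present
  suffices h : ∀ (s : PySem.Set String), s.Nodup →
      (e ∈ fields.foldl (fun found f =>
        (fce_index.getD f []).foldl (fun found e => PySem.Set.add found e) found) s ↔
       e ∈ s ∨ ∃ f ∈ fields, e ∈ fce_index.getD f []) by
    simpa using h PySem.Set.empty (by simp [PySem.Set.empty])
  induction fields with
  | nil => simp
  | cons f t ih =>
    intro s hs
    simp only [inner_eq_update] at ih
    simp only [List.foldl_cons, inner_eq_update]
    rw [ih _ (PySem.Set.nodup_update _ _ hs)]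
    simp [PySem.Set.mem_update, List.mem_cons]
    tauto

lemma nodup_entities_present (fields : List String) : (fce_entities_present fields).Nodup := by
  unfold fce_entities_present
  suffices h : ∀ (s : PySem.Set String), s.Nodup →
      (fields.foldl (fun found f =>
        (fce_index.getD f []).foldl (fun found e => PySem.Set.add found e) found) s).Nodup by
    exact h PySem.Set.empty (by simp [PySem.Set.empty])
  induction fields with
  | nil => exact fun s hs => hs
  | cons f t ih =>
    intro s hs
    simp only [inner_eq_update] at ih
    simp only [List.foldl_cons, inner_eq_update]
    exact ih _ (PySem.Set.nodup_update _ _ hs)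

-- the reverse index reads back the table
lemma mem_getD_index (f e : String) :
    e ∈ fce_index.getD f [] ↔ ∃ p ∈ commonEntityFields, f ∈ p.2 ∧ e = p.1 := by
  unfold fce_index
  rw [PySem.Dict.getD_foldl_modify_append]
  simp only [PySem.Dict.getD_empty, List.nil_append, List.mem_map, List.mem_filter]
  unfold fce_pairs
  constructor
  · rintro ⟨q, ⟨hq, hq1⟩, rfl⟩
    simp only [List.mem_flatMap, List.mem_map] at hq
    obtain ⟨p, hp, a, ha, rfl⟩ := hq
    simp only [beq_iff_eq] at hq1
    exact ⟨p, hp, hq1 ▸ ha, rfl⟩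
  · rintro ⟨p, hp, hf, rfl⟩
    refine ⟨(f, p.1), ⟨?_, by simp⟩, rfl⟩
    simp only [List.mem_flatMap, List.mem_map]
    exact ⟨p, hp, f, hf, rfl⟩

-- the table's keys: two entries sharing a key are equal
lemma key_inj {p q : String × List String}
    (hp : p ∈ commonEntityFields) (hq : q ∈ commonEntityFields) (h : p.1 = q.1) : p = q := by
  fin_cases hp <;> fin_cases hq <;> simp_all

lemma main_perm (t1 t2 : List String) :
    (commonEntityFields.foldl (fun acc p =>
      let c1 := p.2.any (fun al => t1.contains al)
      let c2 := p.2.any (fun al => t2.contains al)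
      if c1 && c2 then PySem.Set.add acc p.1 else acc) PySem.Set.empty).Perm
    (PySem.Set.inter (fce_entities_present t1) (fce_entities_present t2)) := by
  apply (List.perm_ext_iff_of_nodup ?_ ?_).mpr
  · intro e
    rw [mem_foldl_if_add, PySem.Set.mem_inter, mem_entities_present, mem_entities_present]
    simp only [PySem.Set.empty, List.not_mem_nil, false_or]
    constructor
    · rintro ⟨p, hp, hc, rfl⟩
      simp only [Bool.and_eq_true, List.any_eq_true, List.contains_iff_mem] at hc
      obtain ⟨⟨a1, ha1, ha1t⟩, ⟨a2, ha2, ha2t⟩⟩ := hc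
      constructor
      · exact ⟨a1, ha1t, (mem_getD_index _ _).mpr ⟨p, hp, ha1, rfl⟩⟩
      · exact ⟨a2, ha2t, (mem_getD_index _ _).mpr ⟨p, hp, ha2, rfl⟩⟩
    · rintro ⟨⟨f1, hf1, hi1⟩, ⟨f2, hf2, hi2⟩⟩
      obtain ⟨p, hp, hfp, rfl⟩ := (mem_getD_index _ _).mp hi1
      obtain ⟨q, hq, hfq, he⟩ := (mem_getD_index _ _).mp hi2
      cases key_inj hq hp he.symm
      refine ⟨p, hp, ?_, rfl⟩
      simp only [Bool.and_eq_true, List.any_eq_true, List.contains_iff_mem]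
      exact ⟨⟨f1, hfp, hf1⟩, ⟨f2, hfq, hf2⟩⟩
  · exact nodup_foldl_if_add _ _ _ (by simp [PySem.Set.empty])
  · exact PySem.Set.nodup_inter _ _ (nodup_entities_present t1)

-- ===== VERDICT (by name: the statement is the Claim_ definition above) =====
theorem find_common_entities_spec : Claim_equal_find_common_entities := by
  intro t1 t2 _
  unfold Spec_find_common_entities find_common_entities find_common_entities_alt
  exact PySem.List.sorted_eq_sorted_of_perm _ _ _ (fun a b h => h) (main_perm t1 t2)
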